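-- pv_equiv track=rewrite | github.com/broberr/STMProject | STMproject/video_stm_activity/src/run_experiment.py | pick_closest_label
-- ===== SOURCE A (Python) =====
-- from typing import Dict, List, Tuple, Optional
--
-- ALLOWED_LABELS = ["meeting", "phone_use", "eating_drinking", "video_call", "using_computer"]
--
-- def pick_closest_label(scores: Dict[str, int]) -> str:
--     scores = {k: v for k, v in scores.items() if k in ALLOWED_LABELS}
--     best_label, best_score = max(scores.items(), key=lambda kv: kv[1])
--
--     # if absolutely no signal, choose safest generic
--     if best_score == 0:
--         return "using_computer"
--
--     # tie-break: prefer more specific intents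
--     specificity_order = ["video_call", "phone_use", "eating_drinking", "meeting", "using_computer"]
--     tied = [k for k, v in scores.items() if v == best_score]
--     for lab in specificity_order:
--         if lab in tied:
--             return lab
--
--     return best_label
-- ===== SOURCE B (Python) =====
-- def pick_closest_label(scores):
--     rank = {"video_call": 0, "phone_use": 1, "eating_drinking": 2,
--             "meeting": 3, "using_computer": 4}
--     items = [(k, v) for k, v in scores.items() if k in rank]
--     best_label, best_score = max(items, key=lambda kv: (kv[1], -rank[kv[0]]))
--     return "using_computer" if best_score == 0 else best_label
-- ===== Notes on version B (the rewrite author's own statement) =====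
-- stated objective: simpler
-- what changed: Replaces the value-max plus explicit tied-list comprehension plus separate specificity-order scan with a single max over a composite (score, -specificity_rank) key, so one pass picks the winner and the tie-break at once.
import Mathlib
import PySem

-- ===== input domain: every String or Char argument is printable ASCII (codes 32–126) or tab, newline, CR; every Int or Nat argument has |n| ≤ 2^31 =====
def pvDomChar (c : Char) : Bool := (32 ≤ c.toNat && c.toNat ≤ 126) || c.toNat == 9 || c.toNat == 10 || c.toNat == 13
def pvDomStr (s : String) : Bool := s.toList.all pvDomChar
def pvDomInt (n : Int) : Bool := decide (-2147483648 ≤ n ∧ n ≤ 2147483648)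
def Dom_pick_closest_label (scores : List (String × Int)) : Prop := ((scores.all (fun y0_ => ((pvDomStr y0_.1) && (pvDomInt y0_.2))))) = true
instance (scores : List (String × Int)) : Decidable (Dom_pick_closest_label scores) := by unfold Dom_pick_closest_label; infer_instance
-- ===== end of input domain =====

-- B replaces A's value-max + tied-list comprehension + separate specificity scan by a single
-- max over a composite (score, -specificity_rank) key (objective: simpler, same complexity).


-- ===== PORT A =====
def pvAllowed : List String := ["meeting", "phone_use", "eating_drinking", "video_call", "using_computer"]

def pvSpecOrder : List String := ["video_call", "phone_use", "eating_drinking", "meeting", "using_computer"]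

def pick_closest_label (scores : List (String × Int)) : String :=
  let d := PySem.Dict.ofList ((PySem.Dict.ofList scores).items.filter (fun kv => pvAllowed.contains kv.1))
  match PySem.List.max? d.items (fun kv => kv.2) with
  | none => ""   -- Python raises ValueError here (max of an empty dict); excluded by Pre_
  | some (best_label, best_score) =>
    if best_score = 0 then "using_computer"
    else
      let tied := (d.items.filter (fun kv => kv.2 == best_score)).map (fun kv => kv.1)
      match pvSpecOrder.find? (fun lab => tied.contains lab) with
      | some lab => lab
      | none => best_label

-- ===== PORT B =====
def pvRank : PySem.Dict String Int :=
  PySem.Dict.ofList [("video_call", 0), ("phone_use", 1), ("eating_drinking", 2), ("meeting", 3), ("using_computer", 4)]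

def pick_closest_label_alt (scores : List (String × Int)) : String :=
  let items := (PySem.Dict.ofList scores).items.filter (fun kv => pvRank.contains kv.1)
  match PySem.List.max2? items (fun kv => kv.2) (fun kv => -(pvRank.getD kv.1 0)) with
  | none => ""   -- Python raises ValueError here; excluded by Pre_
  | some (best_label, best_score) =>
    if best_score = 0 then "using_computer" else best_label

-- ===== PRECONDITION & SPEC =====
-- Pre_ excludes exactly the inputs that contain no allowed label, on which Python's max
-- is applied to an empty sequence and raises ValueError.
def Pre_pick_closest_label (scores : List (String × Int)) : Prop :=
  (scores.any (fun kv => pvAllowed.contains kv.1)) = true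
instance (scores : List (String × Int)) : Decidable (Pre_pick_closest_label scores) := by
  unfold Pre_pick_closest_label; infer_instance

def pvWitness_pick_closest_label : (List (String × Int)) := [("meeting", 1), ("phone_use", 1)]

def Spec_pick_closest_label (scores : List (String × Int)) (out : String) : Prop := out = pick_closest_label_alt scores
instance (scores : List (String × Int)) (out : String) : Decidable (Spec_pick_closest_label scores out) := by unfold Spec_pick_closest_label; infer_instance

-- ===== CLAIM (what is proved, stated in full; the proofs are below) =====
def Claim_equal_pick_closest_label : Prop := ∀ (scores : List (String × Int)), Dom_pick_closest_label scores → Pre_pick_closest_label scores → Spec_pick_closest_label scores (pick_closest_label scores)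

-- ===== LEMMAS AND PROOFS =====

theorem pv_pred_eq (kv : String × Int) : pvAllowed.contains kv.1 = pvRank.contains kv.1 := by
  have h : pvRank = PySem.Dict.mk [("video_call",0),("phone_use",1),("eating_drinking",2),("meeting",3),("using_computer",4)] := by rfl
  rw [h, Bool.eq_iff_iff]
  simp only [pvAllowed, PySem.Dict.contains_mk, List.contains_cons, List.contains_nil,
    List.any_cons, List.any_nil, Bool.or_false, Bool.or_eq_true, beq_iff_eq]
  constructor <;> rintro (h|h|h|h|h) <;> simp [h]


theorem pv_lexle_trans {α : Type} {k1 k2 : α → Int} {a b c : α}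
    (h1 : k1 a < k1 b ∨ (k1 a = k1 b ∧ k2 a ≤ k2 b))
    (h2 : k1 b < k1 c ∨ (k1 b = k1 c ∧ k2 b ≤ k2 c)) :
    k1 a < k1 c ∨ (k1 a = k1 c ∧ k2 a ≤ k2 c) := by
  rcases h1 with h1 | ⟨h1, h1'⟩ <;> rcases h2 with h2 | ⟨h2, h2'⟩
  · exact Or.inl (lt_trans h1 h2)
  · exact Or.inl (h2 ▸ h1)
  · exact Or.inl (h1 ▸ h2)
  · exact Or.inr ⟨h1.trans h2, h1'.trans h2'⟩

theorem pv_max2_aux {α : Type} (k1 k2 : α → Int) (xs : List α) (m : α) :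
    ∃ r, List.foldl (fun acc x =>
      match acc with
      | none => some x
      | some m =>
        if (decide (k1 m < k1 x) || !decide (k1 x < k1 m) && decide (k2 m < k2 x)) = true
        then some x else some m) (some m) xs = some r ∧ r ∈ m :: xs ∧
      (k1 m < k1 r ∨ (k1 m = k1 r ∧ k2 m ≤ k2 r)) ∧
      ∀ y ∈ xs, k1 y < k1 r ∨ (k1 y = k1 r ∧ k2 y ≤ k2 r) := by
  induction xs generalizing m with
  | nil => exact ⟨m, rfl, List.mem_singleton_self m, Or.inr ⟨rfl, le_refl _⟩, by simp⟩
  | cons x xs ih =>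
    rw [List.foldl_cons]
    have hbool : ((decide (k1 m < k1 x) || !decide (k1 x < k1 m) && decide (k2 m < k2 x)) = true)
        ↔ (k1 m < k1 x ∨ (k1 m ≤ k1 x ∧ k2 m < k2 x)) := by
      simp [not_lt]
    by_cases hc : k1 m < k1 x ∨ (k1 m ≤ k1 x ∧ k2 m < k2 x)
    · obtain ⟨r, hr, hmem, hlex, hall⟩ := ih x
      have hmx : k1 m < k1 x ∨ (k1 m = k1 x ∧ k2 m ≤ k2 x) := by
        rcases hc with h | ⟨h, h'⟩
        · exact Or.inl h
        · rcases lt_or_eq_of_le h with h2 | h2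
          · exact Or.inl h2
          · exact Or.inr ⟨h2, le_of_lt h'⟩
      refine ⟨r, ?_, ?_, pv_lexle_trans hmx hlex, ?_⟩
      · show List.foldl _ (if (decide (k1 m < k1 x) || !decide (k1 x < k1 m) && decide (k2 m < k2 x)) = true then some x else some m) xs = some r
        rw [if_pos (hbool.mpr hc)]; exact hr
      · rcases List.mem_cons.mp hmem with h | h
        · exact h ▸ List.mem_cons_of_mem _ List.mem_cons_self
        · exact List.mem_cons_of_mem _ (List.mem_cons_of_mem _ h)
      · intro y hy
        rcases List.mem_cons.mp hy with rfl | hy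
        · exact hlex
        · exact hall y hy
    · obtain ⟨r, hr, hmem, hlex, hall⟩ := ih m
      have hxm : k1 x < k1 m ∨ (k1 x = k1 m ∧ k2 x ≤ k2 m) := by
        push Not at hc
        obtain ⟨h1, h2⟩ := hc
        rcases lt_or_eq_of_le h1 with h3 | h3
        · exact Or.inl h3
        · exact Or.inr ⟨h3, h2 (le_of_eq h3.symm)⟩
      refine ⟨r, ?_, ?_, hlex, ?_⟩
      · show List.foldl _ (if (decide (k1 m < k1 x) || !decide (k1 x < k1 m) && decide (k2 m < k2 x)) = true then some x else some m) xs = some r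
        rw [if_neg (fun h => hc (hbool.mp h))]; exact hr
      · rcases List.mem_cons.mp hmem with h | h
        · exact h ▸ List.mem_cons_self
        · exact List.mem_cons_of_mem _ (List.mem_cons_of_mem _ h)
      · intro y hy
        rcases List.mem_cons.mp hy with rfl | hy
        · exact pv_lexle_trans hxm hlex
        · exact hall y hy

theorem pv_max2_spec {α : Type} (k1 k2 : α → Int) (x : α) (xs : List α) :
    ∃ r, PySem.List.max2? (x :: xs) k1 k2 = some r ∧ r ∈ x :: xs ∧
      ∀ y ∈ x :: xs, k1 y < k1 r ∨ (k1 y = k1 r ∧ k2 y ≤ k2 r) := by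
  obtain ⟨r, hr, hmem, hlex, hall⟩ := pv_max2_aux k1 k2 xs x
  refine ⟨r, hr, hmem, ?_⟩
  intro y hy
  rcases List.mem_cons.mp hy with rfl | hy
  · exact hlex
  · exact hall y hy

theorem pv_tied (l : List (String × Int)) (bs : Int) (lab : String) :
    (((l.filter (fun kv => kv.2 == bs)).map (fun kv => kv.1)).contains lab) = true
    ↔ ∃ kv ∈ l, kv.1 = lab ∧ kv.2 = bs := by
  simp [List.mem_filter]

theorem pv_core (l : List (String × Int)) (hsub : ∀ kv ∈ l, kv.1 ∈ pvAllowed) :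
    (match PySem.List.max? l (fun kv => kv.2) with
     | none => ""
     | some (best_label, best_score) =>
       if best_score = 0 then "using_computer"
       else
         match pvSpecOrder.find? (fun lab =>
             ((l.filter (fun kv => kv.2 == best_score)).map (fun kv => kv.1)).contains lab) with
         | some lab => lab
         | none => best_label)
    = (match PySem.List.max2? l (fun kv => kv.2) (fun kv => -(pvRank.getD kv.1 0)) with
       | none => ""
       | some (best_label, best_score) =>
         if best_score = 0 then "using_computer" else best_label) := by
  cases l with
  | nil => rfl
  | cons x xs =>
    obtain ⟨⟨rl, rv⟩, hB, hrmem, hmax⟩ := pv_max2_spec (fun kv => kv.2) (fun kv => -(pvRank.getD kv.1 0)) x xs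
    cases hA : PySem.List.max? (x :: xs) (fun kv => kv.2) with
    | none => exact absurd ((PySem.List.max?_eq_none_iff _ _).mp hA) (by simp)
    | some p =>
      obtain ⟨bl, bs⟩ := p
      have hmem : (bl, bs) ∈ x :: xs := PySem.List.max?_mem hA
      have hismax : ∀ y ∈ x :: xs, y.2 ≤ bs := by
        intro y hy
        exact PySem.List.max?_isMax (key := fun kv => kv.2) hA y hy
      have hrbs : rv = bs := by
        have h1 : rv ≤ bs := hismax (rl, rv) hrmem
        have h2 := hmax (bl, bs) hmem
        rcases h2 with h2 | ⟨h2, _⟩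
        · exact absurd h2 (not_lt.mpr h1)
        · exact h2.symm
      rw [hB]
      simp only
      by_cases h0 : bs = 0
      · rw [if_pos h0, if_pos (hrbs.trans h0 : rv = 0)]
      · rw [if_neg h0, if_neg (fun h => h0 (hrbs ▸ h : bs = 0))]
        -- A's find?-scan over the literal specificity list = r.1
        have hrtied : ∃ kv ∈ x :: xs, kv.1 = rl ∧ kv.2 = bs := ⟨(rl, rv), hrmem, rfl, hrbs⟩
        have hrallowed : rl ∈ pvAllowed := hsub (rl, rv) hrmem
        -- for any tied kv, rank rl ≤ rank kv.1
        have hrank : ∀ kv ∈ x :: xs, kv.2 = bs → pvRank.getD rl 0 ≤ pvRank.getD kv.1 0 := by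
          intro kv hkv hbs
          rcases hmax kv hkv with h | ⟨_, h⟩ <;> simp only [] at h <;> omega
        have hP : ∀ lab : String, ((List.map (fun kv => kv.1) (List.filter (fun kv => kv.2 == bs) (x :: xs))).contains lab) = true ↔ ∃ kv ∈ x :: xs, kv.1 = lab ∧ kv.2 = bs :=
          fun lab => pv_tied (x :: xs) bs lab
        have hrP : ((List.map (fun kv => kv.1) (List.filter (fun kv => kv.2 == bs) (x :: xs))).contains rl) = true := (hP rl).mpr hrtied
        have hrankle : ∀ lab : String, ((List.map (fun kv => kv.1) (List.filter (fun kv => kv.2 == bs) (x :: xs))).contains lab) = true → pvRank.getD rl 0 ≤ pvRank.getD lab 0 := by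
          intro lab hlab
          obtain ⟨kv, hkv, hk1, hk2⟩ := (hP lab).mp hlab
          have h := hrank kv hkv hk2
          rw [hk1] at h
          exact h
        have hralt : rl = "meeting" ∨ rl = "phone_use" ∨ rl = "eating_drinking" ∨ rl = "video_call" ∨ rl = "using_computer" := by
          simpa [pvAllowed] using hrallowed
        simp only [pvSpecOrder]
        by_cases h1 : ((List.map (fun kv => kv.1) (List.filter (fun kv => kv.2 == bs) (x :: xs))).contains "video_call") = true
        · rw [List.find?_cons_of_pos h1]
          have hle := hrankle _ h1
          rcases hralt with rfl | rfl | rfl | rfl | rfl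
          · exact absurd hle (by decide)
          · exact absurd hle (by decide)
          · exact absurd hle (by decide)
          · rfl
          · exact absurd hle (by decide)
        · rw [List.find?_cons_of_neg h1]
          by_cases h2 : ((List.map (fun kv => kv.1) (List.filter (fun kv => kv.2 == bs) (x :: xs))).contains "phone_use") = true
          · rw [List.find?_cons_of_pos h2]
            have hle := hrankle _ h2
            rcases hralt with rfl | rfl | rfl | rfl | rfl
            · exact absurd hle (by decide)
            · rfl
            · exact absurd hle (by decide)
            · exact absurd hrP h1
            · exact absurd hle (by decide)
          · rw [List.find?_cons_of_neg h2]
            by_cases h3 : ((List.map (fun kv => kv.1) (List.filter (fun kv => kv.2 == bs) (x :: xs))).contains "eating_drinking") = true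
            · rw [List.find?_cons_of_pos h3]
              have hle := hrankle _ h3
              rcases hralt with rfl | rfl | rfl | rfl | rfl
              · exact absurd hle (by decide)
              · exact absurd hrP h2
              · rfl
              · exact absurd hrP h1
              · exact absurd hle (by decide)
            · rw [List.find?_cons_of_neg h3]
              by_cases h4 : ((List.map (fun kv => kv.1) (List.filter (fun kv => kv.2 == bs) (x :: xs))).contains "meeting") = true
              · rw [List.find?_cons_of_pos h4]
                have hle := hrankle _ h4
                rcases hralt with rfl | rfl | rfl | rfl | rfl
                · rfl
                · exact absurd hrP h2
                · exact absurd hrP h3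
                · exact absurd hrP h1
                · exact absurd hle (by decide)
              · rw [List.find?_cons_of_neg h4]
                by_cases h5 : ((List.map (fun kv => kv.1) (List.filter (fun kv => kv.2 == bs) (x :: xs))).contains "using_computer") = true
                · rw [List.find?_cons_of_pos h5]
                  rcases hralt with rfl | rfl | rfl | rfl | rfl
                  · exact absurd hrP h4
                  · exact absurd hrP h2
                  · exact absurd hrP h3
                  · exact absurd hrP h1
                  · rfl
                · rcases hralt with rfl | rfl | rfl | rfl | rfl
                  · exact absurd hrP h4
                  · exact absurd hrP h2
                  · exact absurd hrP h3
                  · exact absurd hrP h1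
                  · exact absurd hrP h5

theorem pv_items_ofList (ps : List (String × Int)) (h : (ps.map Prod.fst).Nodup) :
    (PySem.Dict.ofList ps).items = ps := by
  have hfresh : ∀ a ∈ ps, (PySem.Dict.empty : PySem.Dict String Int).contains a.1 = false := by
    intro a _
    exact PySem.Dict.contains_empty a.1
  have hx := PySem.Dict.items_foldl_insert_fresh ps Prod.fst Prod.snd PySem.Dict.empty hfresh h
  simpa [PySem.Dict.ofList, PySem.Dict.update] using hx

-- ===== VERDICT (by name: the statement is the Claim_ definition above) =====
theorem pick_closest_label_spec : Claim_equal_pick_closest_label := by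
  unfold Claim_equal_pick_closest_label Spec_pick_closest_label
  intro scores _ _
  have hfil : (PySem.Dict.ofList scores).items.filter (fun kv => pvAllowed.contains kv.1)
      = (PySem.Dict.ofList scores).items.filter (fun kv => pvRank.contains kv.1) :=
    List.filter_congr (fun kv _ => pv_pred_eq kv)
  have hnd : (((PySem.Dict.ofList scores).items.filter (fun kv => pvAllowed.contains kv.1)).map Prod.fst).Nodup := by
    have h0 : ((PySem.Dict.ofList scores).items.map Prod.fst).Nodup := by
      simpa [PySem.Dict.keys] using PySem.Dict.nodup_keys_ofList scores
    exact h0.sublist (List.Sublist.map _ List.filter_sublist)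
  have hitems := pv_items_ofList _ hnd
  have hsub : ∀ kv ∈ (PySem.Dict.ofList scores).items.filter (fun kv => pvAllowed.contains kv.1), kv.1 ∈ pvAllowed := by
    intro kv hkv
    have h := (List.mem_filter.mp hkv).2
    simpa using h
  show pick_closest_label scores = pick_closest_label_alt scores
  unfold pick_closest_label pick_closest_label_alt
  simp only [hitems, ← hfil]
  exact pv_core _ hsub
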